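-- pv_equiv track=rewrite | github.com/v1sk0/servishub | app/services/part_matching.py | get_quality_group
-- ===== SOURCE A (Python) =====
-- QUALITY_GROUPS = {
--     'original': {
--         'label': 'Original',
--         'grades': ['service_pack', 'original'],
--     },
--     'kopija': {
--         'label': 'Kopija',
--         'grades': ['oled_hard', 'oled_soft', 'oem', 'tft_incell', 'aaa', 'copy'],
--     },
-- }
--
-- def get_quality_group(quality_grade):
--     """Vraca quality grupu za dati grade."""
--     if not quality_grade:
--         return None
--     grade_lower = quality_grade.lower()
--     for group_key, group in QUALITY_GROUPS.items():
--         if grade_lower in group['grades']: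
--             return group_key
--     return None
-- ===== SOURCE B (Python) =====
-- QUALITY_GROUPS = {
--     'original': {
--         'label': 'Original',
--         'grades': ['service_pack', 'original'],
--     },
--     'kopija': {
--         'label': 'Kopija',
--         'grades': ['oled_hard', 'oled_soft', 'oem', 'tft_incell', 'aaa', 'copy'],
--     },
-- }
--
-- GRADE_TO_GROUP = {grade: key for key, g in QUALITY_GROUPS.items() for grade in g['grades']}
--
-- def get_quality_group(quality_grade):
--     """Vraca quality grupu za dati grade."""
--     if not quality_grade:
--         return None
--     return GRADE_TO_GROUP.get(quality_grade.lower())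
-- ===== Notes on version B (the rewrite author's own statement) =====
-- stated objective: simpler
-- what changed: Replaces the per-call scan over QUALITY_GROUPS with a module-level inverse index GRADE_TO_GROUP built once, so the function body is a single dict lookup with no loop.
import Mathlib
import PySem

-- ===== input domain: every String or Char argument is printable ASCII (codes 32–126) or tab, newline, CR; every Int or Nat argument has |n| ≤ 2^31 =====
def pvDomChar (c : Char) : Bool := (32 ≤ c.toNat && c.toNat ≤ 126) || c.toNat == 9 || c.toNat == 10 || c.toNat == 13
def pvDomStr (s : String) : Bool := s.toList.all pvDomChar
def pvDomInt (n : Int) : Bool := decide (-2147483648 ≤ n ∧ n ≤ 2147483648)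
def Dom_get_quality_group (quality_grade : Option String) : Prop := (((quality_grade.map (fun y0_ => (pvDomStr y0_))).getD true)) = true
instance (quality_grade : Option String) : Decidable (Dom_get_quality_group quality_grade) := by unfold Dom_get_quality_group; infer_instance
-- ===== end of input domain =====

-- ===== PORT A =====
-- B builds a module-level inverse index grade→group once; the function is a single lookup (objective: simpler).
-- QUALITY_GROUPS as an association list key ↦ (label, grades), in Python's insertion order.
def QUALITY_GROUPS : List (String × String × List String) :=
  [("original", "Original", ["service_pack", "original"]),
   ("kopija", "Kopija", ["oled_hard", "oled_soft", "oem", "tft_incell", "aaa", "copy"])]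

-- the for-loop with early return: first group whose grades contain grade_lower
def pvScanGroups (l : String) : List (String × String × List String) → Option String
  | [] => none
  | (key, _, grades) :: rest => if grades.contains l then some key else pvScanGroups l rest

def get_quality_group (quality_grade : Option String) : Option String :=
  match quality_grade with
  | none => none
  | some s =>
      if s = "" then none   -- 'not quality_grade' for a string: empty is falsy
      else pvScanGroups (PySem.Str.lower s) QUALITY_GROUPS

-- ===== PORT B =====
-- GRADE_TO_GROUP = {grade: key for key, g in QUALITY_GROUPS.items() for grade in g['grades']}
def GRADE_TO_GROUP : PySem.Dict String String :=
  PySem.Dict.ofList (QUALITY_GROUPS.flatMap (fun kg => kg.2.2.map (fun grade => (grade, kg.1))))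

def get_quality_group_alt (quality_grade : Option String) : Option String :=
  match quality_grade with
  | none => none
  | some s =>
      if s = "" then none
      else GRADE_TO_GROUP.get? (PySem.Str.lower s)

-- ===== PRECONDITION & SPEC =====
def Spec_get_quality_group (quality_grade : Option String) (out : Option String) : Prop := out = get_quality_group_alt quality_grade
instance (quality_grade : Option String) (out : Option String) : Decidable (Spec_get_quality_group quality_grade out) := by unfold Spec_get_quality_group; infer_instance

-- ===== CLAIM =====
def Claim_equal_get_quality_group : Prop := ∀ (quality_grade : Option String), Dom_get_quality_group quality_grade → Spec_get_quality_group quality_grade (get_quality_group quality_grade)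

-- ===== LEMMAS AND PROOFS =====
-- the inverse index, evaluated to its literal association list
lemma grade_to_group_eval :
    GRADE_TO_GROUP = PySem.Dict.mk
      [("service_pack", "original"), ("original", "original"), ("oled_hard", "kopija"),
       ("oled_soft", "kopija"), ("oem", "kopija"), ("tft_incell", "kopija"),
       ("aaa", "kopija"), ("copy", "kopija")] := by decide

-- for any lowercased grade l, the first-match scan agrees with the inverse-index lookup
set_option maxRecDepth 8192 in
lemma scan_eq_lookup (l : String) :
    pvScanGroups l QUALITY_GROUPS = GRADE_TO_GROUP.get? l := by
  rw [grade_to_group_eval]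
  simp only [QUALITY_GROUPS, pvScanGroups, PySem.Dict.get?_mk_cons, List.contains]
  simp only [PySem.Dict.get?]
  split_ifs <;> simp_all <;> simp_all [eq_comm]

-- ===== VERDICT =====
theorem get_quality_group_spec : Claim_equal_get_quality_group := by
  unfold Claim_equal_get_quality_group Spec_get_quality_group
  intro q _
  match q with
  | none => rfl
  | some s =>
      simp only [get_quality_group, get_quality_group_alt]
      split_ifs with h
      · rfl
      · exact scan_eq_lookup _
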